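-- pv_equiv track=rewrite | github.com/MrBrantCode/unitest_baseline | mut_generate/mist_train_cf/cf_89070/solution.py | count_unique_characters
-- ===== SOURCE A (Python) =====
-- def count_unique_characters(s):
--     unique_chars = set()
--     ignore_chars = ['"', "'", '(', ')']
--     to_ignore = False
--     ignore_stack = []
--
--     for char in s:
--         if char in ignore_chars:
--             if char in ['"', "'"] and not to_ignore:
--                 to_ignore = True
--                 continue
--             elif char in ['"', "'"] and to_ignore:
--                 to_ignore = False
--                 continue
--             elif char == '(':
--                 ignore_stack.append(char)
--             elif char == ')' and ignore_stack:
--                 ignore_stack.pop()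
--         if not to_ignore and char not in ignore_chars:
--             unique_chars.add(char)
--
--     return len(unique_chars)
-- ===== SOURCE B (Python) =====
-- def _find_quote(t):
--     for k, c in enumerate(t):
--         if c in '"\'':
--             return k
--     return -1
--
-- def _outside(t):
--     i = _find_quote(t)
--     if i == -1:
--         return t
--     rest = t[i+1:]
--     j = _find_quote(rest)
--     if j == -1:
--         return t[:i]
--     return t[:i] + _outside(rest[j+1:])
--
-- def count_unique_characters(s):
--     return len({c for c in _outside(s) if c not in '()'})
-- ===== Notes on version B (the rewrite author's own statement) =====
-- stated objective: alternative
-- what changed: Replaces A's per-character toggle/stack state machine by a recursive locate-quote-then-slice decomposition: find the next quote pair, keep the slice before it, recurse on the tail after the closing quote, then count the distinct non-paren characters of the reconstructed outside text.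
import Mathlib
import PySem

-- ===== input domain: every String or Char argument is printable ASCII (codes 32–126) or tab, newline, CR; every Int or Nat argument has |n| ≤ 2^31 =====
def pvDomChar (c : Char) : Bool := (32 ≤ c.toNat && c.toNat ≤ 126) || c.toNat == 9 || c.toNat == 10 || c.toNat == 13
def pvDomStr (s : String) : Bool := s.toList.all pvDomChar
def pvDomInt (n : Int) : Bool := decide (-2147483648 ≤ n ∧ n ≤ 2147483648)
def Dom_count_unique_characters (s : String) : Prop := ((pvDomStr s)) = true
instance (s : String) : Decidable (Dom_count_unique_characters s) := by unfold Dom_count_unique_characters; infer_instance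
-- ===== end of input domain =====

-- B replaces A's per-character toggle/stack state machine by a recursive locate-quote-then-slice
-- decomposition (objective: alternative; a timing run measured B faster by a constant factor).

-- ===== PORT A =====
-- state: (unique_chars, to_ignore, ignore_stack)
def pvStepA (st : PySem.Set Char × Bool × List Char) (c : Char) :
    PySem.Set Char × Bool × List Char :=
  if c == '"' || c == '\'' || c == '(' || c == ')' then
    if (c == '"' || c == '\'') && !st.2.1 then (st.1, true, st.2.2)        -- continue
    else if (c == '"' || c == '\'') && st.2.1 then (st.1, false, st.2.2)   -- continue
    else
      let stk := if c == '(' then st.2.2 ++ [c]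
                 else if c == ')' && !st.2.2.isEmpty then st.2.2.dropLast else st.2.2
      -- falls through to the final `if`, which is false here (c is in ignore_chars)
      (st.1, st.2.1, stk)
  else if !st.2.1 then (PySem.Set.add st.1 c, st.2.1, st.2.2)
  else (st.1, st.2.1, st.2.2)

def count_unique_characters (s : String) : Int :=
  PySem.Set.len (s.toList.foldl pvStepA (PySem.Set.empty, false, ([] : List Char))).1

-- ===== PORT B =====
def pvIsQuote (c : Char) : Bool := c == '"' || c == '\''

-- _find_quote: index of the first quote character, -1 if none
def pvFindQuote : List Char → Int
  | [] => -1
  | c :: cs =>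
    if pvIsQuote c then 0
    else if pvFindQuote cs = -1 then -1 else pvFindQuote cs + 1

theorem pvFindQuote_nonneg (t : List Char) (h : pvFindQuote t ≠ -1) : 0 ≤ pvFindQuote t := by
  induction t with
  | nil => simp [pvFindQuote] at h
  | cons c cs ih =>
    by_cases hc : pvIsQuote c
    · simp [pvFindQuote, hc]
    · by_cases hr : pvFindQuote cs = -1
      · simp [pvFindQuote, hc, hr] at h
      · have := ih hr
        simp only [pvFindQuote, hc, if_false, hr, Bool.false_eq_true]
        omega

theorem pvFindQuote_ne_nil {t : List Char} (h : pvFindQuote t ≠ -1) : t ≠ [] := by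
  intro he; subst he; simp [pvFindQuote] at h

theorem pv_slice_from_len_le {α : Type} (xs : List α) (a : Int) (h : 0 ≤ a) :
    (PySem.List.slice xs (some a)).length ≤ xs.length := by
  rw [PySem.List.slice_from xs h]
  simp

theorem pv_slice_from_len_lt {α : Type} (xs : List α) (a : Int) (h1 : 1 ≤ a) (h2 : xs ≠ []) :
    (PySem.List.slice xs (some a)).length < xs.length := by
  rw [PySem.List.slice_from xs (by omega)]
  have := List.length_pos_iff.mpr h2
  simp only [List.length_drop]
  omega

-- _outside: the text outside quoted spans
def pvOutside (t : List Char) : List Char :=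
  let i := pvFindQuote t
  if _hi : i = -1 then t
  else
    let rest := PySem.List.slice t (some (i + 1)) none
    let j := pvFindQuote rest
    if _hj : j = -1 then PySem.List.slice t none (some i)
    else PySem.List.slice t none (some i) ++ pvOutside (PySem.List.slice rest (some (j + 1)) none)
termination_by t.length
decreasing_by
  have hi0 : 0 ≤ pvFindQuote t := pvFindQuote_nonneg t _hi
  have hj0 : 0 ≤ pvFindQuote (PySem.List.slice t (some (pvFindQuote t + 1))) :=
    pvFindQuote_nonneg _ _hj
  calc (PySem.List.slice (PySem.List.slice t (some (pvFindQuote t + 1)))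
          (some (pvFindQuote (PySem.List.slice t (some (pvFindQuote t + 1))) + 1))).length
      ≤ (PySem.List.slice t (some (pvFindQuote t + 1))).length :=
        pv_slice_from_len_le _ _ (by omega)
    _ < t.length := pv_slice_from_len_lt _ _ (by omega) (pvFindQuote_ne_nil _hi)

def count_unique_characters_alt (s : String) : Int :=
  PySem.Set.len (PySem.Set.ofList ((pvOutside s.toList).filter (fun c => !(c == '(' || c == ')'))))

-- ===== PRECONDITION & SPEC =====
def Spec_count_unique_characters (s : String) (out : Int) : Prop := out = count_unique_characters_alt s
instance (s : String) (out : Int) : Decidable (Spec_count_unique_characters s out) := by unfold Spec_count_unique_characters; infer_instance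

-- ===== CLAIM (what is proved, stated in full; the proofs are below) =====
def Claim_equal_count_unique_characters : Prop := ∀ (s : String), Dom_count_unique_characters s → Spec_count_unique_characters s (count_unique_characters s)

-- ===== LEMMAS AND PROOFS =====

-- the sequence of characters A actually adds to unique_chars, in order
def pvAdds : List Char → Bool → List Char
  | [], _ => []
  | c :: cs, ti =>
    if pvIsQuote c then pvAdds cs (!ti)
    else if ti then pvAdds cs ti
    else if c == '(' || c == ')' then pvAdds cs ti
    else c :: pvAdds cs ti

theorem pvStepA_quote {c : Char} (acc : PySem.Set Char) (ti : Bool) (stk : List Char)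
    (hq : pvIsQuote c = true) : pvStepA (acc, ti, stk) c = (acc, !ti, stk) := by
  have hq' : (c == '"' || c == '\'') = true := hq
  cases ti <;> simp [pvStepA, hq']

theorem pvStepA_paren {c : Char} (acc : PySem.Set Char) (ti : Bool) (stk : List Char)
    (hq : pvIsQuote c = false) (hp : (c == '(' || c == ')') = true) :
    ∃ stk', pvStepA (acc, ti, stk) c = (acc, ti, stk') := by
  have hq' : (c == '"' || c == '\'') = false := hq
  have hig : (c == '"' || c == '\'' || c == '(' || c == ')') = true := by
    simp only [Bool.or_eq_true] at hp ⊢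
    tauto
  refine ⟨if c == '(' then stk ++ [c] else if c == ')' && !stk.isEmpty then stk.dropLast
    else stk, ?_⟩
  simp only [Bool.or_eq_true, beq_iff_eq] at hp
  rcases hp with hc | hc <;> subst hc <;> simp [pvStepA]

theorem pvStepA_plain {c : Char} (acc : PySem.Set Char) (ti : Bool) (stk : List Char)
    (hq : pvIsQuote c = false) (hp : (c == '(' || c == ')') = false) :
    pvStepA (acc, ti, stk) c =
      (if ti then (acc, ti, stk) else (PySem.Set.add acc c, ti, stk)) := by
  have hq' : (c == '"' || c == '\'') = false := hq
  have hig : (c == '"' || c == '\'' || c == '(' || c == ')') = false := by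
    simp only [Bool.or_eq_false_iff] at hq' hp ⊢
    exact ⟨⟨hq', hp.1⟩, hp.2⟩
  cases ti <;> simp [pvStepA, hig]

-- A's fold builds exactly the set of pvAdds (the stack never influences unique_chars)
theorem pvfoldA_eq (cs : List Char) : ∀ (acc : PySem.Set Char) (ti : Bool) (stk : List Char),
    (cs.foldl pvStepA (acc, ti, stk)).1 = List.foldl PySem.Set.add acc (pvAdds cs ti) := by
  induction cs with
  | nil => intro acc ti stk; simp [pvAdds]
  | cons c cs ih =>
    intro acc ti stk
    simp only [List.foldl_cons]
    by_cases hq : pvIsQuote c = true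
    · rw [pvStepA_quote acc ti stk hq, ih]
      simp [pvAdds, hq]
    · have hq' : pvIsQuote c = false := by simpa using hq
      by_cases hp : (c == '(' || c == ')') = true
      · obtain ⟨stk', hstep⟩ := pvStepA_paren acc ti stk hq' hp
        rw [hstep, ih]
        cases ti <;> simp [pvAdds, hq', hp]
      · have hp' : (c == '(' || c == ')') = false := by simpa using hp
        rw [pvStepA_plain acc ti stk hq' hp']
        cases ti
        · simp only [Bool.false_eq_true, if_false]
          rw [ih]
          simp [pvAdds, hq', hp']
        · simp only [if_true]
          rw [ih]
          simp [pvAdds, hq']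

-- characterisation of _find_quote
theorem pvFindQuote_spec (t : List Char) :
    (pvFindQuote t = -1 ∧ ∀ c ∈ t, pvIsQuote c = false) ∨
    (∃ pre q suf, t = pre ++ q :: suf ∧ pvIsQuote q = true ∧
      (∀ c ∈ pre, pvIsQuote c = false) ∧ pvFindQuote t = pre.length) := by
  induction t with
  | nil => left; simp [pvFindQuote]
  | cons c cs ih =>
    by_cases hq : pvIsQuote c = true
    · right; exact ⟨[], c, cs, by simp, hq, by simp, by simp [pvFindQuote, hq]⟩
    · have hq' : pvIsQuote c = false := by simpa using hq
      rcases ih with ⟨h1, h2⟩ | ⟨pre, q, suf, he, hqq, hpre, hidx⟩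
      · left
        constructor
        · simp [pvFindQuote, hq', h1]
        · intro x hx
          rcases List.mem_cons.mp hx with rfl | hx
          · exact hq'
          · exact h2 x hx
      · right
        refine ⟨c :: pre, q, suf, by simp [he], hqq, ?_, ?_⟩
        · intro x hx
          rcases List.mem_cons.mp hx with rfl | hx
          · exact hq'
          · exact hpre x hx
        · have hne : pvFindQuote cs ≠ -1 := by rw [hidx]; omega
          simp only [pvFindQuote, hq', Bool.false_eq_true, if_false, hidx,
            List.length_cons]
          push_cast
          ring

-- pvAdds on a quote-free block, visible (ti = false) and hidden (ti = true)
theorem pvAdds_append_false (pre : List Char) (rest : List Char)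
    (h : ∀ c ∈ pre, pvIsQuote c = false) :
    pvAdds (pre ++ rest) false =
      pre.filter (fun c => !(c == '(' || c == ')')) ++ pvAdds rest false := by
  induction pre with
  | nil => simp
  | cons c pre ih =>
    have hc : pvIsQuote c = false := h c (by simp)
    have h' : ∀ x ∈ pre, pvIsQuote x = false := fun x hx => h x (by simp [hx])
    simp only [List.cons_append, pvAdds, hc, Bool.false_eq_true, if_false, List.filter_cons]
    by_cases hp : (c == '(' || c == ')') = true
    · simp [hp, ih h']
    · simp only [Bool.not_eq_true] at hp
      simp [hp, ih h']

theorem pvAdds_append_true (pre : List Char) (rest : List Char)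
    (h : ∀ c ∈ pre, pvIsQuote c = false) :
    pvAdds (pre ++ rest) true = pvAdds rest true := by
  induction pre with
  | nil => simp
  | cons c pre ih =>
    have hc : pvIsQuote c = false := h c (by simp)
    have h' : ∀ x ∈ pre, pvIsQuote x = false := fun x hx => h x (by simp [hx])
    simp only [List.cons_append, pvAdds, hc, Bool.false_eq_true, if_false, if_true, ih h']

-- main bridge: the filtered outside text IS the sequence A adds
theorem pvOutside_eq_adds (t : List Char) :
    (pvOutside t).filter (fun c => !(c == '(' || c == ')')) = pvAdds t false := by
  rcases pvFindQuote_spec t with ⟨h1, h2⟩ | ⟨pre, q, suf, he, hq, hpre, hidx⟩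
  · rw [pvOutside.eq_def]
    simp only [h1, dite_true]
    have := pvAdds_append_false t [] h2
    simpa [pvAdds] using this.symm
  · have hne : pvFindQuote t ≠ -1 := by rw [hidx]; omega
    have hi0 : (0:Int) ≤ pvFindQuote t := pvFindQuote_nonneg t hne
    have hrest : PySem.List.slice t (some (pvFindQuote t + 1)) = suf := by
      rw [PySem.List.slice_from t (by omega), hidx, he]
      have h3 : ((pre.length : Int) + 1).toNat = pre.length + 1 := by omega
      rw [h3]
      rw [show pre.length + 1 = (pre ++ [q]).length by simp]
      rw [show pre ++ q :: suf = (pre ++ [q]) ++ suf by simp]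
      exact List.drop_left
    have hpref : PySem.List.slice t none (some (pvFindQuote t)) = pre := by
      rw [PySem.List.slice_to t (by omega), hidx, he]
      have h3 : ((pre.length : Int)).toNat = pre.length := by omega
      rw [h3]
      exact List.take_left
    have hradds : pvAdds t false =
        pre.filter (fun c => !(c == '(' || c == ')')) ++ pvAdds suf true := by
      rw [he, pvAdds_append_false pre _ hpre]
      simp [pvAdds, hq]
    rw [pvOutside.eq_def]
    simp only [hne, dite_false, hrest]
    rcases pvFindQuote_spec suf with ⟨g1, g2⟩ | ⟨pre2, q2, suf2, ge, gq, gpre, gidx⟩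
    · have hsuf : pvAdds suf true = [] := by
        simpa [pvAdds] using pvAdds_append_true suf [] g2
      simp only [g1, dite_true, hpref, hradds, hsuf, List.append_nil]
    · have gne : pvFindQuote suf ≠ -1 := by rw [gidx]; omega
      have gi0 : (0:Int) ≤ pvFindQuote suf := pvFindQuote_nonneg suf gne
      have grest : PySem.List.slice suf (some (pvFindQuote suf + 1)) = suf2 := by
        rw [PySem.List.slice_from suf (by omega), gidx, ge]
        have g3 : ((pre2.length : Int) + 1).toNat = pre2.length + 1 := by omega
        rw [g3]
        rw [show pre2.length + 1 = (pre2 ++ [q2]).length by simp]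
        rw [show pre2 ++ q2 :: suf2 = (pre2 ++ [q2]) ++ suf2 by simp]
        exact List.drop_left
      simp only [gne, dite_false, hpref, grest, List.filter_append]
      rw [pvOutside_eq_adds suf2, hradds]
      congr 1
      rw [ge, pvAdds_append_true pre2 _ gpre]
      simp [pvAdds, gq]
termination_by t.length
decreasing_by
  rw [he, ge]
  simp only [List.length_append, List.length_cons]
  omega

-- ===== VERDICT (by name: the statement is the Claim_ definition above) =====
theorem count_unique_characters_spec : Claim_equal_count_unique_characters := by
  intro s _
  unfold Spec_count_unique_characters count_unique_characters count_unique_characters_alt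
  rw [pvfoldA_eq, ← pvOutside_eq_adds]
  rfl
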